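-- pv_equiv track=rewrite | github.com/ZaytsevNS/python_codewars | 7KYU/mobile_keyboard.py | mobile_keyboard
-- ===== SOURCE A (Python) =====
-- def mobile_keyboard(s: str) -> int:
--     keyboard: dict = {1: '0123456789*#',
--                       2: 'adgjmptw',
--                       3: 'behknqux',
--                       4: 'cfilorvy',
--                       5: 'sz'
--                       }
--     return sum(k for k, v in keyboard.items() for i in s if i in v)
-- ===== SOURCE B (Python) =====
-- def mobile_keyboard(s: str) -> int:
--     # Closed-form T9 arithmetic: no keyboard table. Digits/*/# take 1 press;
--     # a lowercase letter's presses = its position within its key group + 2,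
--     # groups being abc def ghi jkl mno pqrs tuv wxyz.
--     total = 0
--     for c in s:
--         if ('0' <= c <= '9') or c == '*' or c == '#':
--             total += 1
--         elif 'a' <= c <= 'z':
--             i = ord(c) - ord('a')
--             if i < 15:
--                 total += i % 3 + 2    # abc..mno: groups of 3
--             elif i < 19:
--                 total += i - 13       # pqrs
--             elif i < 22:
--                 total += i - 17       # tuv
--             else:
--                 total += i - 20       # wxyz
--     return total
-- ===== Notes on version B (the rewrite author's own statement) =====
-- stated objective: alternative
-- what changed: B drops the keyboard table entirely and computes each character's press count by closed-form char-code arithmetic (T9 groups of 3 letters plus pqrs/wxyz: presses = position-in-group + 2, digits/*/# = 1) in a single pass, instead of A's scan of the whole string per keyboard entry with membership tests.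
import Mathlib
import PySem

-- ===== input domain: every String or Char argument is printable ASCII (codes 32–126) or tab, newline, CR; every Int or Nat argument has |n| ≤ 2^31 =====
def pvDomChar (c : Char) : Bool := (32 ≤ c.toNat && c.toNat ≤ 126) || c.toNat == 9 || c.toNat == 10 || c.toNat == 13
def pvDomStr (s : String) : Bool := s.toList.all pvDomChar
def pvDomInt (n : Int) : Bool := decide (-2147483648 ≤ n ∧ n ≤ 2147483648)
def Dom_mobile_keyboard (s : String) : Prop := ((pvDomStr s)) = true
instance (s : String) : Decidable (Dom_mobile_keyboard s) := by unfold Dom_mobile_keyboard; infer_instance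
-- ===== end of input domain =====

set_option maxRecDepth 10000


-- B replaces A's keyboard table and per-entry string scans with closed-form
-- char-code arithmetic in a single pass; same result, different algorithm.

-- ===== PORT A =====
-- the dict literal {1: '0123…', …} as an association list in insertion order
def pvKbA : List (Int × String) :=
  [(1, "0123456789*#"), (2, "adgjmptw"), (3, "behknqux"), (4, "cfilorvy"), (5, "sz")]

-- sum(k for k, v in keyboard.items() for i in s if i in v): outer loop over items, inner over s
def mobile_keyboard (s : String) : Int :=
  pvKbA.foldl
    (fun acc kv =>
      s.toList.foldl (fun acc2 i => if i ∈ kv.2.toList then acc2 + kv.1 else acc2) acc)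
    0

-- ===== PORT B =====
-- closed-form per-character press count (T9 arithmetic, no keyboard data)
def pvPressB (c : Char) : Int :=
  if ('0' ≤ c ∧ c ≤ '9') ∨ c = '*' ∨ c = '#' then 1
  else if 'a' ≤ c ∧ c ≤ 'z' then
    let i : Int := (c.toNat : Int) - ('a'.toNat : Int)
    if i < 15 then i % 3 + 2
    else if i < 19 then i - 13
    else if i < 22 then i - 17
    else i - 20
  else 0

def mobile_keyboard_alt (s : String) : Int :=
  s.toList.foldl (fun acc c => acc + pvPressB c) 0

-- ===== PRECONDITION & SPEC =====
def Spec_mobile_keyboard (s : String) (out : Int) : Prop := out = mobile_keyboard_alt s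
instance (s : String) (out : Int) : Decidable (Spec_mobile_keyboard s out) := by unfold Spec_mobile_keyboard; infer_instance

-- ===== CLAIM =====
def Claim_equal_mobile_keyboard : Prop := ∀ (s : String), Dom_mobile_keyboard s → Spec_mobile_keyboard s (mobile_keyboard s)

-- ===== LEMMAS AND PROOFS =====

-- per-character presses according to A's keyboard, as a sum of indicators
def pvPressA (c : Char) : Int :=
  (if c ∈ "0123456789*#".toList then (1 : Int) else 0) +
  (if c ∈ "adgjmptw".toList then 2 else 0) +
  (if c ∈ "behknqux".toList then 3 else 0) +
  (if c ∈ "cfilorvy".toList then 4 else 0) +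
  (if c ∈ "sz".toList then 5 else 0)

lemma pv_foldl_if (v : List Char) (k : Int) (l : List Char) (a : Int) :
    l.foldl (fun acc i => if i ∈ v then acc + k else acc) a
      = a + (l.map (fun i => if i ∈ v then k else 0)).sum := by
  induction l generalizing a with
  | nil => simp
  | cons x t ih =>
    simp only [List.foldl_cons, List.map_cons, List.sum_cons]
    split_ifs <;> rw [ih] <;> ring

lemma pv_press_sum (l : List Char) :
    (l.map pvPressA).sum
      = (l.map (fun i => if i ∈ "0123456789*#".toList then (1 : Int) else 0)).sum
      + (l.map (fun i => if i ∈ "adgjmptw".toList then (2 : Int) else 0)).sum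
      + (l.map (fun i => if i ∈ "behknqux".toList then (3 : Int) else 0)).sum
      + (l.map (fun i => if i ∈ "cfilorvy".toList then (4 : Int) else 0)).sum
      + (l.map (fun i => if i ∈ "sz".toList then (5 : Int) else 0)).sum := by
  induction l with
  | nil => simp
  | cons x t ih => simp only [List.map_cons, List.sum_cons, ih, pvPressA]; ring

lemma pv_perchar_nat :
    ∀ n : Nat, n < 128 → pvPressB (Char.ofNat n) = pvPressA (Char.ofNat n) := by decide

lemma pv_perchar (c : Char) (h : pvDomChar c = true) :
    pvPressB c = pvPressA c := by
  have hn : c.toNat < 128 := by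
    simp only [pvDomChar, Bool.or_eq_true, Bool.and_eq_true, decide_eq_true_eq,
      beq_iff_eq] at h
    omega
  have hc : Char.ofNat c.toNat = c := Char.ofNat_toNat c
  rw [← hc]
  exact pv_perchar_nat c.toNat hn

-- ===== VERDICT =====
theorem mobile_keyboard_spec : Claim_equal_mobile_keyboard := by
  intro s hdom
  unfold Spec_mobile_keyboard mobile_keyboard mobile_keyboard_alt
  have hmem : ∀ c ∈ s.toList, pvDomChar c = true := by
    unfold Dom_mobile_keyboard pvDomStr at hdom
    exact List.all_eq_true.mp hdom
  rw [PySem.List.foldl_add]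
  have hB : (s.toList.map pvPressB).sum = (s.toList.map pvPressA).sum := by
    congr 1
    exact List.map_congr_left (fun c hc => pv_perchar c (hmem c hc))
  rw [hB, pv_press_sum]
  simp only [pvKbA, List.foldl_cons, List.foldl_nil]
  rw [pv_foldl_if, pv_foldl_if, pv_foldl_if, pv_foldl_if, pv_foldl_if]
  ring
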